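-- pv_equiv track=rewrite | github.com/NandarLMA/Connect_Four_Game | connect_four_2players.py | is_positive_slope_win
-- ===== SOURCE A (Python) =====
-- def get_row(data_matrix, row_count, chosen_column):
--     for i_row in range(row_count):
--         if data_matrix[i_row][chosen_column] == 0:
--             return i_row
--
--     return row_count
--
-- def is_positive_slope_win(data_matrix, row_count, col_count, current_player, col_position):
--     row_position = get_row(data_matrix, row_count, col_position) - 1
--     diff = col_position - row_position
--     continuous_spot = 0
--     for i_col in range(col_count):
--         related_row = i_col - diff
--         if 0 <= related_row < row_count:
--             if data_matrix[related_row][i_col] == current_player: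
--                 continuous_spot += 1
--                 if continuous_spot >= 4:
--                     return True
--             else:
--                 continuous_spot = 0
--     return False
-- ===== SOURCE B (Python) =====
-- def get_row(data_matrix, row_count, chosen_column):
--     for i_row in range(row_count):
--         if data_matrix[i_row][chosen_column] == 0:
--             return i_row
--
--     return row_count
--
-- def is_positive_slope_win(data_matrix, row_count, col_count, current_player, col_position):
--     row_position = get_row(data_matrix, row_count, col_position) - 1
--     diff = col_position - row_position
--     # Exhaustive window test: a win iff some 4 consecutive columns all land on
--     # in-range diagonal cells owned by current_player.  (Correct because the
--     # in-range columns of a positive-slope diagonal form one contiguous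
--     # interval, so A's run counter reaches 4 exactly when such a window exists.)
--     return any(
--         all(0 <= s + k - diff < row_count
--             and data_matrix[s + k - diff][s + k] == current_player
--             for k in range(4))
--         for s in range(col_count - 3))
-- ===== Notes on version B (the rewrite author's own statement) =====
-- stated objective: alternative
-- what changed: A's streaming run counter with reset and early return is replaced by an exhaustive window test: for every window of 4 consecutive columns, check whether all four diagonal cells are in range and owned by current_player (any/all); correct because the in-range columns of the diagonal form one contiguous interval.
import Mathlib
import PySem

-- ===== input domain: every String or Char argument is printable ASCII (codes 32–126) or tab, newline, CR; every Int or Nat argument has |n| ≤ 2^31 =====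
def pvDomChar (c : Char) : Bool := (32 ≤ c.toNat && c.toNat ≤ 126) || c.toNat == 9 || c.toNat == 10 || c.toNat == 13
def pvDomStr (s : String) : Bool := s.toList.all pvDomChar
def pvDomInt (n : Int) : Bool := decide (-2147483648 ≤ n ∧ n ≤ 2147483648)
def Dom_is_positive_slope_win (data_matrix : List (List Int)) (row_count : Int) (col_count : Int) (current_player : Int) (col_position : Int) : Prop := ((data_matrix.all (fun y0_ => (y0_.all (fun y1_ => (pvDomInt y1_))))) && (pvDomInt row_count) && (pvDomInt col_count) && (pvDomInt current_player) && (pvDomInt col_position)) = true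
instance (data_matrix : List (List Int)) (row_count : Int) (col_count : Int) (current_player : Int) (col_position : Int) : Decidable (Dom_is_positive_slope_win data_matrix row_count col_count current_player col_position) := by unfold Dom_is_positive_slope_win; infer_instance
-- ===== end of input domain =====

-- B replaces A's streaming run counter (increment/reset, early return) by an exhaustive
-- window test: some 4 consecutive columns all land on in-range diagonal cells of the
-- current player; same order of cost, different algorithm.
-- data_matrix[r][c], defaulting outside Pre_ (where Python raises; nothing is claimed there)
def pvCell (data_matrix : List (List Int)) (r c : Int) : Int :=
  (PySem.List.pyGet? ((PySem.List.pyGet? data_matrix r).getD []) c).getD 0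

-- helper of A's module, also used verbatim by B's module
def get_row_loop (data_matrix : List (List Int)) (chosen_column row_count : Int) : List Int → Int
  | [] => row_count
  | i :: rest =>
      if pvCell data_matrix i chosen_column = 0 then i
      else get_row_loop data_matrix chosen_column row_count rest

def get_row (data_matrix : List (List Int)) (row_count chosen_column : Int) : Int :=
  get_row_loop data_matrix chosen_column row_count (PySem.List.pyRange 0 row_count 1)

-- ===== PORT A =====
def ipsw_loop (data_matrix : List (List Int)) (row_count current_player diff : Int)
    (continuous_spot : Int) : List Int → Bool
  | [] => false
  | i_col :: rest =>
      let related_row := i_col - diff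
      if 0 ≤ related_row ∧ related_row < row_count then
        if pvCell data_matrix related_row i_col = current_player then
          if continuous_spot + 1 ≥ 4 then true
          else ipsw_loop data_matrix row_count current_player diff (continuous_spot + 1) rest
        else ipsw_loop data_matrix row_count current_player diff 0 rest
      else ipsw_loop data_matrix row_count current_player diff continuous_spot rest

def is_positive_slope_win (data_matrix : List (List Int)) (row_count : Int) (col_count : Int) (current_player : Int) (col_position : Int) : Bool :=
  let row_position := get_row data_matrix row_count col_position - 1
  let diff := col_position - row_position
  ipsw_loop data_matrix row_count current_player diff 0 (PySem.List.pyRange 0 col_count 1)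

-- ===== PORT B =====
-- Source B's inner 'all(... for k in range(4))': the window of 4 columns starting at s
def pvWinAt (data_matrix : List (List Int)) (row_count current_player diff s : Int) : Bool :=
  (PySem.List.pyRange 0 4 1).all (fun k =>
    decide (0 ≤ s + k - diff) && decide (s + k - diff < row_count) &&
    (pvCell data_matrix (s + k - diff) (s + k) == current_player))

def is_positive_slope_win_alt (data_matrix : List (List Int)) (row_count : Int) (col_count : Int) (current_player : Int) (col_position : Int) : Bool :=
  let row_position := get_row data_matrix row_count col_position - 1
  let diff := col_position - row_position
  (PySem.List.pyRange 0 (col_count - 3) 1).any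
    (fun s => pvWinAt data_matrix row_count current_player diff s)

-- ===== PRECONDITION & SPEC =====
-- Pre_ admits exactly the inputs on which A returns normally: it excludes the inputs where
-- either the column scan of get_row or the diagonal scan hits an out-of-range index and A
-- raises IndexError.
def pvColOKb (row : List Int) (c : Int) : Bool :=
  decide (-(row.length : Int) ≤ c) && decide (c < (row.length : Int))

-- first row of the scanned column prefix that is invalid or holds a zero (where get_row stops or raises)
def pvStopRaw (data_matrix : List (List Int)) (row_count col_position : Int) : Option Nat :=
  (data_matrix.take row_count.toNat).findIdx?
    (fun row => !pvColOKb row col_position || ((PySem.List.pyGet? row col_position).getD 0 == 0))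

def pvPreB (data_matrix : List (List Int)) (row_count col_count col_position : Int) : Bool :=
  let L : Int := data_matrix.length
  let z := pvStopRaw data_matrix row_count col_position
  let grOK := match z with
    | none => decide (row_count ≤ L)
    | some j => pvColOKb ((data_matrix.take row_count.toNat).getD j []) col_position
  let stop : Int := match z with
    | none => row_count
    | some j => (j : Int)
  let diff := col_position - (stop - 1)
  grOK &&
    ((List.range (min row_count.toNat data_matrix.length)).all fun r =>
      !(decide ((0:Int) ≤ (r : Int) + diff) && decide ((r : Int) + diff < col_count)) ||
        decide ((r : Int) + diff < ((data_matrix.getD r []).length : Int))) &&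
    (!decide (L < row_count) ||
      !decide (max L (-diff) < min row_count (col_count - diff)))

def Pre_is_positive_slope_win (data_matrix : List (List Int)) (row_count : Int) (col_count : Int) (current_player : Int) (col_position : Int) : Prop :=
  pvPreB data_matrix row_count col_count col_position = true
instance (data_matrix : List (List Int)) (row_count : Int) (col_count : Int) (current_player : Int) (col_position : Int) : Decidable (Pre_is_positive_slope_win data_matrix row_count col_count current_player col_position) := by unfold Pre_is_positive_slope_win; infer_instance

def pvWitness_is_positive_slope_win : List (List Int) × Int × Int × Int × Int :=
  ([[1, 0], [0, 0]], 2, 2, 1, 0)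

def Spec_is_positive_slope_win (data_matrix : List (List Int)) (row_count : Int) (col_count : Int) (current_player : Int) (col_position : Int) (out : Bool) : Prop := out = is_positive_slope_win_alt data_matrix row_count col_count current_player col_position
instance (data_matrix : List (List Int)) (row_count : Int) (col_count : Int) (current_player : Int) (col_position : Int) (out : Bool) : Decidable (Spec_is_positive_slope_win data_matrix row_count col_count current_player col_position out) := by unfold Spec_is_positive_slope_win; infer_instance

-- ===== CLAIM (what is proved, stated in full; the proofs are below) =====
def Claim_equal_is_positive_slope_win : Prop := ∀ (data_matrix : List (List Int)) (row_count : Int) (col_count : Int) (current_player : Int) (col_position : Int), Dom_is_positive_slope_win data_matrix row_count col_count current_player col_position → Pre_is_positive_slope_win data_matrix row_count col_count current_player col_position → Spec_is_positive_slope_win data_matrix row_count col_count current_player col_position (is_positive_slope_win data_matrix row_count col_count current_player col_position)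

-- ===== LEMMAS AND PROOFS =====

-- "column j hits an in-range diagonal cell of the current player"
def pvP (m : List (List Int)) (rc cp diff j : Int) : Prop :=
  0 ≤ j - diff ∧ j - diff < rc ∧ pvCell m (j - diff) j = cp

-- B's window test, characterised
lemma pvWinAt_iff (m : List (List Int)) (rc cp diff s : Int) :
    pvWinAt m rc cp diff s = true ↔
      pvP m rc cp diff s ∧ pvP m rc cp diff (s+1) ∧
      pvP m rc cp diff (s+2) ∧ pvP m rc cp diff (s+3) := by
  have h4 : PySem.List.pyRange 0 4 1 = [0, 1, 2, 3] := by decide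
  simp only [pvWinAt, h4, List.all_cons, List.all_nil, Bool.and_eq_true,
    decide_eq_true_eq, beq_iff_eq, pvP]
  constructor
  · rintro ⟨⟨⟨a1, a2⟩, a3⟩, ⟨⟨b1, b2⟩, b3⟩, ⟨⟨c1, c2⟩, c3⟩, ⟨⟨d1, d2⟩, d3⟩, -⟩
    refine ⟨⟨by omega, by omega, ?_⟩, ⟨by omega, by omega, ?_⟩,
      ⟨by omega, by omega, ?_⟩, ⟨by omega, by omega, ?_⟩⟩
    · simpa using a3
    · simpa using b3
    · simpa using c3
    · simpa using d3
  · rintro ⟨⟨a1, a2, a3⟩, ⟨b1, b2, b3⟩, ⟨c1, c2, c3⟩, ⟨d1, d2, d3⟩⟩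
    refine ⟨⟨⟨by omega, by omega⟩, by simpa using a3⟩,
      ⟨⟨by omega, by omega⟩, by simpa using b3⟩,
      ⟨⟨by omega, by omega⟩, by simpa using c3⟩,
      ⟨⟨by omega, by omega⟩, by simpa using d3⟩, trivial⟩

-- once the diagonal has left the board above (rc ≤ s - diff), A's loop can never fire
lemma pv_dead (m : List (List Int)) (rc cp diff cc : Int) :
    ∀ n : Nat, ∀ s cont : Int, (cc - s).toNat = n → rc ≤ s - diff →
    ipsw_loop m rc cp diff cont (PySem.List.pyRange s cc 1) = false := by
  intro n
  induction n with
  | zero =>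
      intro s cont hn _
      rw [PySem.List.pyRange_one_eq_nil (by omega)]
      rfl
  | succ n ih =>
      intro s cont hn hr
      rw [PySem.List.pyRange_one_cons (by omega)]
      simp only [ipsw_loop]
      rw [if_neg (by omega)]
      exact ih (s+1) cont (by omega) (by omega)

-- main invariant: A's fused counter loop over columns s..cc-1, entered with a run of
-- length cont just finished (columns s-cont..s-1 all hits), fires iff a full window
-- of 4 consecutive hit columns ends at or after column s
lemma pv_main (m : List (List Int)) (rc cp diff cc : Int) :
    ∀ n : Nat, ∀ s cont : Int, (cc - s).toNat = n → 0 ≤ cont → cont < 4 →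
    (∀ j : Int, s - cont ≤ j → j < s → pvP m rc cp diff j) →
    (ipsw_loop m rc cp diff cont (PySem.List.pyRange s cc 1) = true ↔
      ∃ t : Int, s - cont ≤ t ∧ s ≤ t + 3 ∧ t + 3 < cc ∧
        pvP m rc cp diff t ∧ pvP m rc cp diff (t+1) ∧
        pvP m rc cp diff (t+2) ∧ pvP m rc cp diff (t+3)) := by
  intro n
  induction n with
  | zero =>
      intro s cont hn _ _ _
      rw [PySem.List.pyRange_one_eq_nil (by omega)]
      simp only [ipsw_loop]
      constructor
      · intro h; exact absurd h (by simp)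
      · rintro ⟨t, -, h1, h2, -⟩; omega
  | succ n ih =>
      intro s cont hn hc0 hc4 hpre
      have hslt : s < cc := by omega
      rw [PySem.List.pyRange_one_cons hslt]
      simp only [ipsw_loop]
      by_cases hg : 0 ≤ s - diff ∧ s - diff < rc
      · rw [if_pos hg]
        by_cases hv : pvCell m (s - diff) s = cp
        · rw [if_pos hv]
          by_cases h4 : cont + 1 ≥ 4
          · rw [if_pos h4]
            have hc3 : cont = 3 := by omega
            constructor
            · intro _
              refine ⟨s - 3, by omega, by omega, by omega, ?_, ?_, ?_, ?_⟩
              · exact hpre (s-3) (by omega) (by omega)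
              · have := hpre (s-2) (by omega) (by omega); simpa [show s-3+1 = s-2 by omega] using this
              · have := hpre (s-1) (by omega) (by omega); simpa [show s-3+2 = s-1 by omega] using this
              · have : pvP m rc cp diff s := ⟨hg.1, hg.2, hv⟩
                simpa [show s-3+3 = s by omega] using this
            · intro _; rfl
          · rw [if_neg h4]
            have hps : pvP m rc cp diff s := ⟨hg.1, hg.2, hv⟩
            have hpre' : ∀ j : Int, (s+1) - (cont+1) ≤ j → j < s+1 → pvP m rc cp diff j := by
              intro j h1 h2
              by_cases hj : j < s
              · exact hpre j (by omega) hj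
              · have : j = s := by omega
                subst this; exact hps
            rw [ih (s+1) (cont+1) (by omega) (by omega) (by omega) hpre']
            constructor
            · rintro ⟨t, h1, h2, h3, hw⟩
              exact ⟨t, by omega, by omega, h3, hw⟩
            · rintro ⟨t, h1, h2, h3, hw⟩
              refine ⟨t, by omega, ?_, h3, hw⟩
              by_cases ht : t + 3 = s
              · omega
              · omega
        · rw [if_neg hv]
          rw [ih (s+1) 0 (by omega) le_rfl (by omega) (by intro j h1 h2; omega)]
          constructor
          · rintro ⟨t, h1, h2, h3, hw⟩
            exact ⟨t, by omega, by omega, h3, hw⟩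
          · rintro ⟨t, h1, h2, h3, w0, w1, w2, w3⟩
            -- if t ≤ s the window contains column s, contradicting the mismatch at s
            have hts : s + 1 ≤ t := by
              by_contra ht
              have hk : t = s ∨ t + 1 = s ∨ t + 2 = s ∨ t + 3 = s := by omega
              rcases hk with h | h | h | h
              · exact hv (h ▸ w0).2.2
              · exact hv (h ▸ w1).2.2
              · exact hv (h ▸ w2).2.2
              · exact hv (h ▸ w3).2.2
            exact ⟨t, by omega, by omega, h3, w0, w1, w2, w3⟩
      · rw [if_neg hg]
        by_cases hc : cont = 0
        · subst hc
          rw [ih (s+1) 0 (by omega) le_rfl (by omega) (by intro j h1 h2; omega)]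
          constructor
          · rintro ⟨t, h1, h2, h3, hw⟩
            exact ⟨t, by omega, by omega, h3, hw⟩
          · rintro ⟨t, h1, h2, h3, w0, w1, w2, w3⟩
            refine ⟨t, ?_, ?_, h3, w0, w1, w2, w3⟩
            · by_cases ht : t = s
              · exact absurd ⟨(ht ▸ w0).1, (ht ▸ w0).2.1⟩ hg
              · omega
            · by_cases ht : t = s
              · exact absurd ⟨(ht ▸ w0).1, (ht ▸ w0).2.1⟩ hg
              · omega
        · -- cont > 0: the run just before s was in range, so s is past the top of the
          -- board; every later column is too, and no window can end at or after s
          have hps1 : pvP m rc cp diff (s-1) := hpre (s-1) (by omega) (by omega)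
          have hd0 : 0 ≤ s - 1 - diff := hps1.1
          have hd1 : s - 1 - diff < rc := hps1.2.1
          have hr : rc ≤ s - diff := by
            rcases not_and_or.mp hg with h | h
            · omega
            · omega
          rw [pv_dead m rc cp diff cc (cc - (s+1)).toNat (s+1) cont rfl (by omega)]
          constructor
          · intro h; exact absurd h (by simp)
          · rintro ⟨t, h1, h2, h3, -, -, -, w3⟩
            have := w3.2.1
            omega

-- ===== VERDICT (by name: the statement is the Claim_ definition above) =====
theorem is_positive_slope_win_spec : Claim_equal_is_positive_slope_win := by
  intro m rc cc cp colp _ _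
  unfold Spec_is_positive_slope_win is_positive_slope_win is_positive_slope_win_alt
  rw [Bool.eq_iff_iff]
  rw [pv_main m rc cp (colp - (get_row m rc colp - 1)) cc (cc - 0).toNat 0 0 rfl le_rfl
    (by omega) (by intro j h1 h2; omega)]
  rw [List.any_eq_true]
  constructor
  · rintro ⟨t, h1, h2, h3, hw⟩
    refine ⟨t, ?_, ?_⟩
    · rw [PySem.List.mem_pyRange_one]; omega
    · rw [pvWinAt_iff]; exact hw
  · rintro ⟨t, hmem, hwin⟩
    rw [PySem.List.mem_pyRange_one] at hmem
    rw [pvWinAt_iff] at hwin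
    exact ⟨t, by omega, by omega, by omega, hwin⟩
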